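-- pv_equiv track=rewrite | github.com/JiahuaLink/laughing-leetcode | 考试真题python/考勤信息.py | award
-- ===== SOURCE A (Python) =====
-- def award(s):
--     if s.count('absent') > 1:  ##判断缺勤不超过1次
--         return 'false'
--     if s.count('late late') > 0 or s.count('leaveearly leaveearly') > 0 or s.count('late leaveearly') or s.count(
--             'leaveearly late'):  ##判断没有连续的迟到早退
--         return 'false'
--     sl = s.split(" ")  ##把每行字符串转换成列表
--     for i in range(len(sl)):  ##判断任意连续7次考勤，迟到早退和缺勤不超过3次
--         if sl[i] == 'absent' or sl[i] == 'late' or sl[i] == 'leaveearly':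
--             num = 0
--             l = sl[i + 1:i + 7]
--             num += l.count('absent')
--             num += l.count('late')
--             num += l.count('leaveearly')
--             if num > 2:
--                 return 'false'
--     return 'true'
-- ===== SOURCE B (Python) =====
-- def award(s):
--     if s.count('absent') > 1:
--         return 'false'
--     if s.count('late late') or s.count('leaveearly leaveearly') or s.count('late leaveearly') or s.count('leaveearly late'):
--         return 'false'
--     bad = [i for i, w in enumerate(s.split(' ')) if w in ('absent', 'late', 'leaveearly')]
--     if any(j - i <= 6 for i, j in zip(bad, bad[3:])):
--         return 'false'
--     return 'true'
-- ===== Notes on version B (the rewrite author's own statement) =====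
-- stated objective: alternative
-- what changed: A's window rule (for each index, slice the next six words and recount three list.counts) is replaced by collecting the positions of absent/late/leaveearly words once and checking whether any four consecutive bad positions fit within a span of 6; the two substring checks are kept.
import Mathlib
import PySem

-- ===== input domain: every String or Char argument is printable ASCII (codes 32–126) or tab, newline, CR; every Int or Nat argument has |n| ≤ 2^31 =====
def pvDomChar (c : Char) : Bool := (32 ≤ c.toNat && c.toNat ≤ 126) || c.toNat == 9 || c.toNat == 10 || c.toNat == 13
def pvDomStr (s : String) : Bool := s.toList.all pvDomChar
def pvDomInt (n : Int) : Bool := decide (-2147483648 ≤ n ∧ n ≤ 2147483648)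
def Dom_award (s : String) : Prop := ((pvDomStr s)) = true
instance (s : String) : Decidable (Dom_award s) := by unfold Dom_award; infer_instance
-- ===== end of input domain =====

-- B replaces A's per-index slice-and-recount window scan by collecting the positions of
-- absent/late/leaveearly words once and checking whether four of them fit within a span of 6
-- (objective: alternative, a different characterization of the 7-window rule; not claimed faster).

-- ===== PORT A =====
-- the for-loop over range(len(sl)) with its early 'return false'
def awardLoopA (sl : List String) : List Int → String
  | [] => "true"
  | i :: rest =>
    if PySem.List.pyGetD sl i "" == "absent" || PySem.List.pyGetD sl i "" == "late"
        || PySem.List.pyGetD sl i "" == "leaveearly" then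
      let l := PySem.List.slice sl (some (i + 1)) (some (i + 7))
      let num := PySem.List.count l "absent" + PySem.List.count l "late"
        + PySem.List.count l "leaveearly"
      if num > 2 then "false" else awardLoopA sl rest
    else awardLoopA sl rest

def award (s : String) : String :=
  if PySem.Str.count s "absent" > 1 then "false"
  else if PySem.Str.count s "late late" > 0 || PySem.Str.count s "leaveearly leaveearly" > 0
      || PySem.Str.count s "late leaveearly" ≠ 0 || PySem.Str.count s "leaveearly late" ≠ 0 then
    "false"
  else
    let sl := (PySem.Str.split? s " ").getD []
    awardLoopA sl (PySem.List.pyRange 0 (sl.length : Int))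

-- ===== PORT B =====
def award_alt (s : String) : String :=
  if PySem.Str.count s "absent" > 1 then "false"
  else if PySem.Str.count s "late late" ≠ 0 || PySem.Str.count s "leaveearly leaveearly" ≠ 0
      || PySem.Str.count s "late leaveearly" ≠ 0 || PySem.Str.count s "leaveearly late" ≠ 0 then
    "false"
  else
    let bad := ((PySem.List.enumerate ((PySem.Str.split? s " ").getD [])).filter
        (fun p => p.2 == "absent" || p.2 == "late" || p.2 == "leaveearly")).map (·.1)
    if (bad.zip (PySem.List.slice bad (some 3) none)).any (fun p => p.2 - p.1 ≤ 6) then "false"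
    else "true"

-- ===== PRECONDITION & SPEC =====
def Spec_award (s : String) (out : String) : Prop := out = award_alt s
instance (s : String) (out : String) : Decidable (Spec_award s out) := by unfold Spec_award; infer_instance

-- ===== CLAIM (what is proved, stated in full; the proofs are below) =====
def Claim_equal_award : Prop := ∀ (s : String), Dom_award s → Spec_award s (award s)

-- ===== LEMMAS AND PROOFS =====

-- the word predicate both programs test
def pvBd (w : String) : Bool := w == "absent" || w == "late" || w == "leaveearly"

-- positions of the bad words of sl, in increasing order
def pvRng (sl : List String) : List Nat :=
  (List.range sl.length).filter (fun j => pvBd (sl.getD j ""))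

-- the common characterization of the window rule: four bad positions within a span of 6
def pvMid (sl : List String) : Prop :=
  ∃ i1 i2 i3 i4 : Nat, i1 < i2 ∧ i2 < i3 ∧ i3 < i4 ∧ i4 ≤ i1 + 6 ∧ i4 < sl.length ∧
    pvBd (sl.getD i1 "") = true ∧ pvBd (sl.getD i2 "") = true ∧
    pvBd (sl.getD i3 "") = true ∧ pvBd (sl.getD i4 "") = true

-- the loop-body test of A at index i
def pvCondA (sl : List String) (i : Int) : Bool :=
  pvBd (PySem.List.pyGetD sl i "") &&
    decide (2 < PySem.List.count (PySem.List.slice sl (some (i + 1)) (some (i + 7))) "absent"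
      + PySem.List.count (PySem.List.slice sl (some (i + 1)) (some (i + 7))) "late"
      + PySem.List.count (PySem.List.slice sl (some (i + 1)) (some (i + 7))) "leaveearly")

theorem pvLoopA_spec (sl : List String) (il : List Int) :
    awardLoopA sl il = if il.any (fun i => pvCondA sl i) then "false" else "true" := by
  induction il with
  | nil => simp [awardLoopA]
  | cons i rest ih =>
    have hun : awardLoopA sl (i :: rest) =
        if pvBd (PySem.List.pyGetD sl i "") then
          (if 2 < PySem.List.count (PySem.List.slice sl (some (i + 1)) (some (i + 7))) "absent"
              + PySem.List.count (PySem.List.slice sl (some (i + 1)) (some (i + 7))) "late"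
              + PySem.List.count (PySem.List.slice sl (some (i + 1)) (some (i + 7))) "leaveearly"
            then "false" else awardLoopA sl rest)
        else awardLoopA sl rest := rfl
    rw [hun, ih]
    by_cases hb : pvBd (PySem.List.pyGetD sl i "") = true <;>
      by_cases hn : 2 < List.count "absent" (PySem.List.slice sl (some (i + 1)) (some (i + 7)))
          + List.count "late" (PySem.List.slice sl (some (i + 1)) (some (i + 7)))
          + List.count "leaveearly" (PySem.List.slice sl (some (i + 1)) (some (i + 7))) <;>
      simp [hb, hn, pvCondA, PySem.List.count, List.any_cons]

theorem pvCount3 (l : List String) :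
    PySem.List.count l "absent" + PySem.List.count l "late" + PySem.List.count l "leaveearly"
      = l.countP pvBd := by
  induction l with
  | nil => simp [PySem.List.count]
  | cons x t ih =>
    simp only [PySem.List.count] at ih ⊢
    rw [List.count_cons, List.count_cons, List.count_cons, List.countP_cons]
    by_cases h1 : x = "absent"
    · simp [pvBd, h1]; omega
    · by_cases h2 : x = "late"
      · simp [pvBd, h2]; omega
      · by_cases h3 : x = "leaveearly"
        · simp [pvBd, h3]; omega
        · simp [pvBd, h1, h2, h3]; omega

theorem pvCge1 {α : Type} (p : α → Bool) (l : List α) (d : α) :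
    1 ≤ l.countP p ↔ ∃ j, j < l.length ∧ p (l.getD j d) = true := by
  induction l with
  | nil => simp
  | cons x t ih =>
    rw [List.countP_cons]
    by_cases hx : p x = true
    · rw [if_pos hx]
      constructor
      · intro _
        exact ⟨0, by simp, by simpa [List.getD_cons_zero]⟩
      · intro _; omega
    · rw [if_neg hx]
      constructor
      · intro h
        obtain ⟨j, hj, hpj⟩ := ih.1 (by omega)
        exact ⟨j + 1, by simp; omega, by simpa [List.getD_cons_succ]⟩
      · rintro ⟨j, hj, hpj⟩
        cases j with
        | zero => rw [List.getD_cons_zero] at hpj; exact absurd hpj hx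
        | succ j' =>
          rw [List.getD_cons_succ] at hpj
          have := ih.2 ⟨j', by simp at hj; omega, hpj⟩
          omega

theorem pvCge2 {α : Type} (p : α → Bool) (l : List α) (d : α) :
    2 ≤ l.countP p ↔ ∃ j1 j2, j1 < j2 ∧ j2 < l.length ∧
      p (l.getD j1 d) = true ∧ p (l.getD j2 d) = true := by
  induction l with
  | nil => simp
  | cons x t ih =>
    rw [List.countP_cons]
    by_cases hx : p x = true
    · rw [if_pos hx]
      constructor
      · intro h
        obtain ⟨j, hj, hpj⟩ := (pvCge1 p t d).1 (by omega)
        exact ⟨0, j + 1, by omega, by simp; omega, by simpa [List.getD_cons_zero],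
          by simpa [List.getD_cons_succ]⟩
      · rintro ⟨j1, j2, h12, h2len, hp1, hp2⟩
        obtain ⟨j2', rfl⟩ : ∃ j2', j2 = j2' + 1 := ⟨j2 - 1, by omega⟩
        rw [List.getD_cons_succ] at hp2
        have := (pvCge1 p t d).2 ⟨j2', by simp at h2len; omega, hp2⟩
        omega
    · rw [if_neg hx]
      constructor
      · intro h
        obtain ⟨j1, j2, h12, h2len, hp1, hp2⟩ := ih.1 (by omega)
        exact ⟨j1 + 1, j2 + 1, by omega, by simp; omega, by simpa [List.getD_cons_succ],
          by simpa [List.getD_cons_succ]⟩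
      · rintro ⟨j1, j2, h12, h2len, hp1, hp2⟩
        obtain ⟨j1', rfl⟩ : ∃ j1', j1 = j1' + 1 := by
          cases j1 with
          | zero => rw [List.getD_cons_zero] at hp1; exact absurd hp1 hx
          | succ j1' => exact ⟨j1', rfl⟩
        obtain ⟨j2', rfl⟩ : ∃ j2', j2 = j2' + 1 := ⟨j2 - 1, by omega⟩
        rw [List.getD_cons_succ] at hp1 hp2
        have := ih.2 ⟨j1', j2', by omega, by simp at h2len; omega, hp1, hp2⟩
        omega

theorem pvCge3 {α : Type} (p : α → Bool) (l : List α) (d : α) :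
    3 ≤ l.countP p ↔ ∃ j1 j2 j3, j1 < j2 ∧ j2 < j3 ∧ j3 < l.length ∧
      p (l.getD j1 d) = true ∧ p (l.getD j2 d) = true ∧ p (l.getD j3 d) = true := by
  induction l with
  | nil => simp
  | cons x t ih =>
    rw [List.countP_cons]
    by_cases hx : p x = true
    · rw [if_pos hx]
      constructor
      · intro h
        obtain ⟨j1, j2, h12, h2len, hp1, hp2⟩ := (pvCge2 p t d).1 (by omega)
        exact ⟨0, j1 + 1, j2 + 1, by omega, by omega, by simp; omega,
          by simpa [List.getD_cons_zero], by simpa [List.getD_cons_succ],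
          by simpa [List.getD_cons_succ]⟩
      · rintro ⟨j1, j2, j3, h12, h23, h3len, hp1, hp2, hp3⟩
        obtain ⟨j2', rfl⟩ : ∃ j2', j2 = j2' + 1 := ⟨j2 - 1, by omega⟩
        obtain ⟨j3', rfl⟩ : ∃ j3', j3 = j3' + 1 := ⟨j3 - 1, by omega⟩
        rw [List.getD_cons_succ] at hp2 hp3
        have := (pvCge2 p t d).2 ⟨j2', j3', by omega, by simp at h3len; omega, hp2, hp3⟩
        omega
    · rw [if_neg hx]
      constructor
      · intro h
        obtain ⟨j1, j2, j3, h12, h23, h3len, hp1, hp2, hp3⟩ := ih.1 (by omega)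
        exact ⟨j1 + 1, j2 + 1, j3 + 1, by omega, by omega, by simp; omega,
          by simpa [List.getD_cons_succ], by simpa [List.getD_cons_succ],
          by simpa [List.getD_cons_succ]⟩
      · rintro ⟨j1, j2, j3, h12, h23, h3len, hp1, hp2, hp3⟩
        obtain ⟨j1', rfl⟩ : ∃ j1', j1 = j1' + 1 := by
          cases j1 with
          | zero => rw [List.getD_cons_zero] at hp1; exact absurd hp1 hx
          | succ j1' => exact ⟨j1', rfl⟩
        obtain ⟨j2', rfl⟩ : ∃ j2', j2 = j2' + 1 := ⟨j2 - 1, by omega⟩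
        obtain ⟨j3', rfl⟩ : ∃ j3', j3 = j3' + 1 := ⟨j3 - 1, by omega⟩
        rw [List.getD_cons_succ] at hp1 hp2 hp3
        have := ih.2 ⟨j1', j2', j3', by omega, by omega, by simp at h3len; omega, hp1, hp2, hp3⟩
        omega

theorem pvWindowGetD (sl : List String) (k j : Nat)
    (hj : j < ((sl.drop (k+1)).take 6).length) :
    ((sl.drop (k+1)).take 6).getD j "" = sl.getD (k+1+j) "" := by
  have hj' : j < (sl.drop (k+1)).length := by simp at hj ⊢; omega
  have hjn : k+1+j < sl.length := by simp at hj'; omega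
  rw [List.getD_eq_getElem _ _ hj, List.getElem_take, List.getElem_drop,
    ← List.getD_eq_getElem _ ("") hjn]

theorem pvWindow (sl : List String) (k : Nat) :
    3 ≤ ((sl.drop (k+1)).take 6).countP pvBd ↔
      ∃ i2 i3 i4, k < i2 ∧ i2 < i3 ∧ i3 < i4 ∧ i4 ≤ k + 6 ∧ i4 < sl.length ∧
        pvBd (sl.getD i2 "") = true ∧ pvBd (sl.getD i3 "") = true ∧
        pvBd (sl.getD i4 "") = true := by
  have hlen : ((sl.drop (k+1)).take 6).length = min 6 (sl.length - (k+1)) := by simp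
  rw [pvCge3 pvBd _ ""]
  constructor
  · rintro ⟨j1, j2, j3, h12, h23, h3len, hp1, hp2, hp3⟩
    rw [pvWindowGetD sl k j1 (by omega)] at hp1
    rw [pvWindowGetD sl k j2 (by omega)] at hp2
    rw [pvWindowGetD sl k j3 (by omega)] at hp3
    exact ⟨k+1+j1, k+1+j2, k+1+j3, by omega, by omega, by omega, by omega,
      by rw [hlen] at h3len; omega, hp1, hp2, hp3⟩
  · rintro ⟨i2, i3, i4, hk2, h23, h34, hle, hn, hp2, hp3, hp4⟩
    refine ⟨i2 - (k+1), i3 - (k+1), i4 - (k+1), by omega, by omega, by rw [hlen]; omega,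
      ?_, ?_, ?_⟩
    · rw [pvWindowGetD sl k _ (by rw [hlen]; omega)]
      have : k + 1 + (i2 - (k+1)) = i2 := by omega
      rw [this]; exact hp2
    · rw [pvWindowGetD sl k _ (by rw [hlen]; omega)]
      have : k + 1 + (i3 - (k+1)) = i3 := by omega
      rw [this]; exact hp3
    · rw [pvWindowGetD sl k _ (by rw [hlen]; omega)]
      have : k + 1 + (i4 - (k+1)) = i4 := by omega
      rw [this]; exact hp4

theorem pvSliceA (sl : List String) (k : Nat) :
    PySem.List.slice sl (some ((k : Int) + 1)) (some ((k : Int) + 7)) = (sl.drop (k+1)).take 6 := by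
  have h1 : ((k : Int) + 1) = ((k + 1 : Nat) : Int) := by push_cast; ring
  have h7 : ((k : Int) + 7) = ((k + 7 : Nat) : Int) := by push_cast; ring
  rw [h1, h7, PySem.List.slice_natCast]
  congr 1
  omega

theorem pvA_iff_mid (sl : List String) :
    ((PySem.List.pyRange 0 (sl.length : Int)).any (fun i => pvCondA sl i) = true) ↔ pvMid sl := by
  rw [List.any_eq_true]
  constructor
  · rintro ⟨i, hmem, hcond⟩
    rw [PySem.List.mem_pyRange_one] at hmem
    obtain ⟨k, rfl⟩ : ∃ k : Nat, i = (k : Int) := ⟨i.toNat, (Int.toNat_of_nonneg hmem.1).symm⟩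
    have hk : k < sl.length := by exact_mod_cast hmem.2
    simp only [pvCondA, Bool.and_eq_true, decide_eq_true_eq] at hcond
    obtain ⟨hbd, hnum⟩ := hcond
    rw [PySem.List.pyGetD_natCast] at hbd
    rw [pvSliceA, pvCount3] at hnum
    obtain ⟨i2, i3, i4, hk2, h23, h34, hle, hn, hp2, hp3, hp4⟩ :=
      (pvWindow sl k).1 (by omega)
    exact ⟨k, i2, i3, i4, hk2, h23, h34, by omega, hn, hbd, hp2, hp3, hp4⟩
  · rintro ⟨i1, i2, i3, i4, h12, h23, h34, hle, hn, hb1, hb2, hb3, hb4⟩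
    refine ⟨(i1 : Int), ?_, ?_⟩
    · rw [PySem.List.mem_pyRange_one]
      constructor
      · exact Int.natCast_nonneg i1
      · exact_mod_cast (by omega : i1 < sl.length)
    · simp only [pvCondA, Bool.and_eq_true, decide_eq_true_eq]
      constructor
      · rw [PySem.List.pyGetD_natCast]; exact hb1
      · rw [pvSliceA, pvCount3]
        have := (pvWindow sl i1).2 ⟨i2, i3, i4, by omega, h23, h34, by omega, hn, hb2, hb3, hb4⟩
        omega

theorem pvEnum_eq {α : Type} (xs : List α) (d : α) (s : Int) :
    PySem.List.enumerate xs s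
      = (List.range xs.length).map (fun (j : Nat) => ((s + (j : Int), xs.getD j d) : Int × α)) := by
  induction xs generalizing s with
  | nil => simp [PySem.List.enumerate]
  | cons x t ih =>
    rw [show PySem.List.enumerate (x :: t) s = (s, x) :: PySem.List.enumerate t (s + 1) from rfl,
      ih (s + 1)]
    simp only [List.length_cons, List.range_succ_eq_map, List.map_cons, List.map_map]
    congr 1
    · simp
    · apply List.map_congr_left
      intro j hj
      simp only [Function.comp_apply, Nat.succ_eq_add_one, List.getD_cons_succ]
      refine Prod.ext ?_ rfl
      push_cast
      ring

theorem pvBad_eq (sl : List String) :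
    ((PySem.List.enumerate sl).filter
        (fun p => p.2 == "absent" || p.2 == "late" || p.2 == "leaveearly")).map (·.1)
      = List.map (fun j : Nat => (j : Int)) (pvRng sl) := by
  rw [pvEnum_eq sl "" 0, List.filter_map, List.map_map]
  unfold pvRng
  have hpred : List.filter ((fun (p : Int × String) =>
        p.2 == "absent" || p.2 == "late" || p.2 == "leaveearly")
        ∘ (fun (j : Nat) => (((0 : Int) + (j : Int), sl.getD j "") : Int × String)))
        (List.range sl.length)
      = List.filter (fun j => pvBd (sl.getD j "")) (List.range sl.length) := by
    apply List.filter_congr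
    intro j _
    simp [pvBd, Function.comp]
  rw [hpred]
  apply List.map_congr_left
  intro j _
  simp [Function.comp]

theorem pvZipAny (m : List Int) (q : Int × Int → Bool) :
    ((m.zip (m.drop 3)).any q = true) ↔
      ∃ kk, kk + 3 < m.length ∧ q (m.getD kk 0, m.getD (kk + 3) 0) = true := by
  rw [List.any_eq_true]
  constructor
  · rintro ⟨pq, hmem, hq⟩
    obtain ⟨kk, hkk, rfl⟩ := List.mem_iff_getElem.1 hmem
    have hlen : (m.zip (m.drop 3)).length = min m.length (m.length - 3) := by
      simp [List.length_zip]
    have hkk3 : kk + 3 < m.length := by rw [hlen] at hkk; omega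
    refine ⟨kk, hkk3, ?_⟩
    have heq : (m.zip (m.drop 3))[kk] = (m.getD kk 0, m.getD (kk + 3) 0) := by
      rw [List.getElem_zip, List.getElem_drop,
        ← List.getD_eq_getElem m (0 : Int) (by omega : kk < m.length),
        ← List.getD_eq_getElem m (0 : Int) (by omega : 3 + kk < m.length),
        Nat.add_comm 3 kk]
    rw [heq] at hq
    exact hq
  · rintro ⟨kk, hkk3, hq⟩
    have hlen : (m.zip (m.drop 3)).length = min m.length (m.length - 3) := by
      simp [List.length_zip]
    have hkk : kk < (m.zip (m.drop 3)).length := by rw [hlen]; omega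
    refine ⟨(m.zip (m.drop 3))[kk], List.getElem_mem hkk, ?_⟩
    have heq : (m.zip (m.drop 3))[kk] = (m.getD kk 0, m.getD (kk + 3) 0) := by
      rw [List.getElem_zip, List.getElem_drop,
        ← List.getD_eq_getElem m (0 : Int) (by omega : kk < m.length),
        ← List.getD_eq_getElem m (0 : Int) (by omega : 3 + kk < m.length),
        Nat.add_comm 3 kk]
    rw [heq]
    exact hq

theorem pvRng_mono (sl : List String) {ii jj : Nat} (hij : ii < jj)
    (hjj : jj < (pvRng sl).length) :
    (pvRng sl).getD ii 0 < (pvRng sl).getD jj 0 := by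
  have hpw : (pvRng sl).Pairwise (· < ·) :=
    List.Pairwise.filter _ List.pairwise_lt_range
  rw [List.getD_eq_getElem _ _ (by omega : ii < (pvRng sl).length),
    List.getD_eq_getElem _ _ hjj]
  exact List.pairwise_iff_getElem.1 hpw ii jj (by omega) hjj hij

theorem pvRng_mem (sl : List String) (x : Nat) :
    x ∈ pvRng sl ↔ x < sl.length ∧ pvBd (sl.getD x "") = true := by
  unfold pvRng
  rw [List.mem_filter, List.mem_range]

theorem pvGap_iff_mid (sl : List String) :
    (∃ kk, kk + 3 < (pvRng sl).length ∧
        (pvRng sl).getD (kk + 3) 0 ≤ (pvRng sl).getD kk 0 + 6) ↔ pvMid sl := by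
  constructor
  · rintro ⟨kk, hkk, hgap⟩
    have hm1 := (pvRng_mem sl _).1 (List.getD_eq_getElem (pvRng sl) 0
      (by omega : kk < (pvRng sl).length) ▸ List.getElem_mem _)
    have hm2 := (pvRng_mem sl _).1 (List.getD_eq_getElem (pvRng sl) 0
      (by omega : kk + 1 < (pvRng sl).length) ▸ List.getElem_mem _)
    have hm3 := (pvRng_mem sl _).1 (List.getD_eq_getElem (pvRng sl) 0
      (by omega : kk + 2 < (pvRng sl).length) ▸ List.getElem_mem _)
    have hm4 := (pvRng_mem sl _).1 (List.getD_eq_getElem (pvRng sl) 0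
      (by omega : kk + 3 < (pvRng sl).length) ▸ List.getElem_mem _)
    refine ⟨(pvRng sl).getD kk 0, (pvRng sl).getD (kk+1) 0, (pvRng sl).getD (kk+2) 0,
      (pvRng sl).getD (kk+3) 0, ?_, ?_, ?_, by omega, hm4.1, hm1.2, hm2.2, hm3.2, hm4.2⟩
    · exact pvRng_mono sl (by omega) (by omega)
    · exact pvRng_mono sl (by omega) (by omega)
    · exact pvRng_mono sl (by omega) (by omega)
  · rintro ⟨i1, i2, i3, i4, h12, h23, h34, hle, hn, hb1, hb2, hb3, hb4⟩
    obtain ⟨p1, hp1, he1⟩ := List.mem_iff_getElem.1 ((pvRng_mem sl i1).2 ⟨by omega, hb1⟩)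
    obtain ⟨p2, hp2, he2⟩ := List.mem_iff_getElem.1 ((pvRng_mem sl i2).2 ⟨by omega, hb2⟩)
    obtain ⟨p3, hp3, he3⟩ := List.mem_iff_getElem.1 ((pvRng_mem sl i3).2 ⟨by omega, hb3⟩)
    obtain ⟨p4, hp4, he4⟩ := List.mem_iff_getElem.1 ((pvRng_mem sl i4).2 ⟨by omega, hb4⟩)
    have hd1 : (pvRng sl).getD p1 0 = i1 := by rw [List.getD_eq_getElem _ _ hp1]; exact he1
    have hd2 : (pvRng sl).getD p2 0 = i2 := by rw [List.getD_eq_getElem _ _ hp2]; exact he2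
    have hd3 : (pvRng sl).getD p3 0 = i3 := by rw [List.getD_eq_getElem _ _ hp3]; exact he3
    have hd4 : (pvRng sl).getD p4 0 = i4 := by rw [List.getD_eq_getElem _ _ hp4]; exact he4
    have hlt : ∀ a b : Nat, a < (pvRng sl).length → b < (pvRng sl).length →
        (pvRng sl).getD a 0 < (pvRng sl).getD b 0 → a < b := by
      intro a b ha hb hab
      rcases Nat.lt_trichotomy a b with h | h | h
      · exact h
      · rw [h] at hab; exact absurd hab (lt_irrefl _)
      · exact absurd (pvRng_mono sl h ha) (by omega)
    have o12 : p1 < p2 := hlt p1 p2 hp1 hp2 (by omega)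
    have o23 : p2 < p3 := hlt p2 p3 hp2 hp3 (by omega)
    have o34 : p3 < p4 := hlt p3 p4 hp3 hp4 (by omega)
    refine ⟨p1, by omega, ?_⟩
    have hmono : (pvRng sl).getD (p1 + 3) 0 ≤ (pvRng sl).getD p4 0 := by
      rcases Nat.lt_or_ge (p1 + 3) p4 with h | h
      · exact Nat.le_of_lt (pvRng_mono sl h hp4)
      · have : p1 + 3 = p4 := by omega
        rw [this]
    omega

theorem pvB_iff_mid (sl : List String) :
    ((((PySem.List.enumerate sl).filter
        (fun p => p.2 == "absent" || p.2 == "late" || p.2 == "leaveearly")).map (·.1)).zip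
      (PySem.List.slice (((PySem.List.enumerate sl).filter
        (fun p => p.2 == "absent" || p.2 == "late" || p.2 == "leaveearly")).map (·.1))
        (some 3) none)).any (fun p => p.2 - p.1 ≤ 6) = true ↔ pvMid sl := by
  rw [pvBad_eq]
  rw [show (3 : Int) = ((3 : Nat) : Int) from rfl]
  rw [PySem.List.slice_from _ (by norm_num)]
  rw [show ((3 : Nat) : Int).toNat = 3 from rfl]
  rw [pvZipAny]
  rw [← pvGap_iff_mid]
  constructor
  · rintro ⟨kk, hkk, hq⟩
    rw [List.length_map] at hkk
    have g1 : (List.map (fun j : Nat => (j : Int)) (pvRng sl)).getD kk 0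
        = ((pvRng sl).getD kk 0 : Int) := by
      rw [List.getD_eq_getElem _ _ (by rw [List.length_map]; omega),
        List.getD_eq_getElem _ _ (by omega : kk < (pvRng sl).length), List.getElem_map]
    have g2 : (List.map (fun j : Nat => (j : Int)) (pvRng sl)).getD (kk + 3) 0
        = ((pvRng sl).getD (kk + 3) 0 : Int) := by
      rw [List.getD_eq_getElem _ _ (by rw [List.length_map]; omega),
        List.getD_eq_getElem _ _ (by omega : kk + 3 < (pvRng sl).length), List.getElem_map]
    simp only [g1, g2, decide_eq_true_eq] at hq
    exact ⟨kk, hkk, by omega⟩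
  · rintro ⟨kk, hkk, hq⟩
    refine ⟨kk, by rw [List.length_map]; omega, ?_⟩
    have g1 : (List.map (fun j : Nat => (j : Int)) (pvRng sl)).getD kk 0
        = ((pvRng sl).getD kk 0 : Int) := by
      rw [List.getD_eq_getElem _ _ (by rw [List.length_map]; omega),
        List.getD_eq_getElem _ _ (by omega : kk < (pvRng sl).length), List.getElem_map]
    have g2 : (List.map (fun j : Nat => (j : Int)) (pvRng sl)).getD (kk + 3) 0
        = ((pvRng sl).getD (kk + 3) 0 : Int) := by
      rw [List.getD_eq_getElem _ _ (by rw [List.length_map]; omega),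
        List.getD_eq_getElem _ _ (by omega : kk + 3 < (pvRng sl).length), List.getElem_map]
    simp only [g1, g2, decide_eq_true_eq]
    omega

-- ===== VERDICT (by name: the statement is the Claim_ definition above) =====
theorem award_spec : Claim_equal_award := by
  intro s _
  unfold Spec_award award award_alt
  by_cases h1 : PySem.Str.count s "absent" > 1
  · rw [if_pos h1, if_pos h1]
  · rw [if_neg h1, if_neg h1]
    by_cases h2 : (decide (PySem.Str.count s "late late" ≠ 0)
        || decide (PySem.Str.count s "leaveearly leaveearly" ≠ 0)
        || decide (PySem.Str.count s "late leaveearly" ≠ 0)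
        || decide (PySem.Str.count s "leaveearly late" ≠ 0)) = true
    · have h2A : (decide (PySem.Str.count s "late late" > 0)
          || decide (PySem.Str.count s "leaveearly leaveearly" > 0)
          || decide (PySem.Str.count s "late leaveearly" ≠ 0)
          || decide (PySem.Str.count s "leaveearly late" ≠ 0)) = true := by
        simp only [Bool.or_eq_true, decide_eq_true_eq] at h2 ⊢
        omega
      rw [if_pos h2A, if_pos h2]
    · have h2A : ¬ (decide (PySem.Str.count s "late late" > 0)
          || decide (PySem.Str.count s "leaveearly leaveearly" > 0)
          || decide (PySem.Str.count s "late leaveearly" ≠ 0)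
          || decide (PySem.Str.count s "leaveearly late" ≠ 0)) = true := by
        simp only [Bool.or_eq_true, decide_eq_true_eq] at h2 ⊢
        omega
      rw [if_neg h2A, if_neg h2]
      refine Eq.trans (pvLoopA_spec _ _) ?_
      exact if_congr ((pvA_iff_mid _).trans (pvB_iff_mid _).symm) rfl rfl
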